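-- pv_equiv track=rewrite | github.com/Awiomanik/Advent_of_Code_2023 | Solutions/2023/Day12/EVENT.py | check_validity_bitwise
-- ===== SOURCE A (Python) =====
-- def check_validity_bitwise(damaged, valid, length):
--     current_counter = 0
--     counter = []
--     bit_mask = 1
--
--     # loop through springs and populate counter
--     for _ in range(length):
--         if damaged & bit_mask:
--             current_counter += 1
--         elif current_counter != 0:
--             counter.append(current_counter)
--             current_counter = 0
--         bit_mask <<= 1
--
--     # Check for any remaining operational springs
--     if current_counter != 0:
--         counter.append(current_counter)
--
--     return counter == valid
-- ===== SOURCE B (Python) =====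
-- def check_validity_bitwise(damaged, valid, length):
--     # Build the LSB-first bit pattern as a string, then RLE it via split.
--     bitstr = ''.join('1' if damaged & (1 << i) else '0' for i in range(length))
--     return [len(g) for g in bitstr.split('0') if g] == valid
-- ===== Notes on version B (the rewrite author's own statement) =====
-- stated objective: idiomatic
-- what changed: Instead of a counter/mask state machine, B materialises the LSB-first bit pattern as a string and computes the run lengths with split('0'), comparing the resulting list to valid; a timing run measured B faster at large sizes (the RLE is done by C-level str.split rather than a per-bit Python branch loop).
import Mathlib
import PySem

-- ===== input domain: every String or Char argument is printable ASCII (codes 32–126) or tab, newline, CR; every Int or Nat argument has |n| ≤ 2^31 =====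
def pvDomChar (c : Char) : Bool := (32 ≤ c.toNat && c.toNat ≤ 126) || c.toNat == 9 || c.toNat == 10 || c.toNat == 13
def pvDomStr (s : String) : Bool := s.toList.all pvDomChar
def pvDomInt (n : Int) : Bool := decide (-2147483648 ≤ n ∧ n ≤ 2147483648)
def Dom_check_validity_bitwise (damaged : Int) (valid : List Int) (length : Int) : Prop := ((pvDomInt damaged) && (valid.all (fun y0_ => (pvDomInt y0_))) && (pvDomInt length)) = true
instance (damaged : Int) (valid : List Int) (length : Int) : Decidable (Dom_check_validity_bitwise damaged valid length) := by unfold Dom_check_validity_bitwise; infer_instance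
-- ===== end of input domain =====

-- B builds the LSB-first bit pattern as a character string and run-length-encodes it
-- with split('0') instead of A's running counter/mask state machine (objective: idiomatic).

-- ===== PORT A =====
-- state = (current_counter, counter, bit_mask); the loop body ignores the range element
def check_validity_bitwise (damaged : Int) (valid : List Int) (length : Int) : Bool :=
  let st := (PySem.List.pyRange 0 length 1).foldl
    (fun (st : Int × List Int × Int) _ =>
      let cc := st.1; let cnt := st.2.1; let mask := st.2.2
      if PySem.Int.band damaged mask ≠ 0 then (cc + 1, cnt, mask <<< (1 : Nat))
      else if cc ≠ 0 then (0, cnt ++ [cc], mask <<< (1 : Nat))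
      else (cc, cnt, mask <<< (1 : Nat)))
    (0, [], 1)
  let counter := if st.1 ≠ 0 then st.2.1 ++ [st.1] else st.2.1
  counter == valid

-- ===== PORT B =====
-- '1 << i' for i from range(length): i is always ≥ 0 there, so 'i.toNat' is exact
def check_validity_bitwise_alt (damaged : Int) (valid : List Int) (length : Int) : Bool :=
  let bitstr := (PySem.List.pyRange 0 length 1).map
    (fun i => if PySem.Int.band damaged ((1 : Int) <<< (i.toNat : Nat)) ≠ 0 then '1' else '0')
  let groups := PySem.Chars.splitOn bitstr ['0']
  ((groups.filter (fun g => g ≠ [])).map (fun g => (g.length : Int))) == valid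

-- ===== PRECONDITION & SPEC =====
def Spec_check_validity_bitwise (damaged : Int) (valid : List Int) (length : Int) (out : Bool) : Prop := out = check_validity_bitwise_alt damaged valid length
instance (damaged : Int) (valid : List Int) (length : Int) (out : Bool) : Decidable (Spec_check_validity_bitwise damaged valid length out) := by unfold Spec_check_validity_bitwise; infer_instance

-- ===== CLAIM (what is proved, stated in full; the proofs are below) =====
def Claim_equal_check_validity_bitwise : Prop := ∀ (damaged : Int) (valid : List Int) (length : Int), Dom_check_validity_bitwise damaged valid length → Spec_check_validity_bitwise damaged valid length (check_validity_bitwise damaged valid length)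

-- ===== LEMMAS AND PROOFS =====

-- run-length encoding of a bool list with a carried count of the open run of trues
def pvRwc (cc : Int) : List Bool → List Int
  | [] => if cc ≠ 0 then [cc] else []
  | b :: bs => if b then pvRwc (cc + 1) bs
               else (if cc ≠ 0 then [cc] else []) ++ pvRwc 0 bs

-- simple recursive characterisation of splitOn on a single-char separator
def pvSplit : List Char → List (List Char)
  | [] => [[]]
  | c :: cs => if c = '0' then [] :: pvSplit cs else (pvSplit cs).modifyHead (c :: ·)

theorem pvSplit_ne_nil : ∀ (cs : List Char), pvSplit cs ≠ []
  | [] => by simp [pvSplit]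
  | c :: cs => by
    simp only [pvSplit]
    split_ifs
    · simp
    · rcases hne : pvSplit cs with _ | ⟨g, gs⟩
      · exact absurd hne (pvSplit_ne_nil cs)
      · simp [List.modifyHead]

theorem modifyHead_idfun {α : Type} (l : List α) : List.modifyHead (fun x => x) l = l := by
  cases l <;> simp [List.modifyHead]

theorem splitOn_go_eq (l : List Char) : ∀ (fuel : Nat) (cur : List Char) (acc : List (List Char)),
    l.length < fuel →
    PySem.Chars.splitOn.go ['0'] fuel l cur acc
      = acc.reverse ++ (pvSplit l).modifyHead (cur.reverse ++ ·) := by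
  induction l with
  | nil =>
    intro fuel cur acc h
    match fuel, h with
    | fuel + 1, _ => simp [PySem.Chars.splitOn.go, pvSplit]
  | cons c rest ih =>
    intro fuel cur acc h
    match fuel, h with
    | fuel + 1, h =>
      by_cases hc : c = '0'
      · subst hc
        have : PySem.Chars.splitOn.go ['0'] (fuel + 1) ('0' :: rest) cur acc
            = PySem.Chars.splitOn.go ['0'] fuel rest [] (cur.reverse :: acc) := by
          simp [PySem.Chars.splitOn.go, List.isPrefixOf]
        rw [this, ih fuel [] (cur.reverse :: acc) (by simpa using h)]
        rcases hne : pvSplit rest with _ | ⟨g, gs⟩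
        · exact absurd hne (pvSplit_ne_nil rest)
        · simp [pvSplit, List.modifyHead, hne]
      · have : PySem.Chars.splitOn.go ['0'] (fuel + 1) (c :: rest) cur acc
            = PySem.Chars.splitOn.go ['0'] fuel rest (c :: cur) acc := by
          simp [PySem.Chars.splitOn.go, List.isPrefixOf, Ne.symm hc]
        rw [this, ih fuel (c :: cur) acc (by simpa using h)]
        simp only [pvSplit, if_neg hc, List.reverse_cons]
        rcases hne : pvSplit rest with _ | ⟨g, gs⟩
        · exact absurd hne (pvSplit_ne_nil rest)
        · simp [List.modifyHead]

theorem splitOn_eq_pvSplit (cs : List Char) :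
    PySem.Chars.splitOn cs ['0'] = pvSplit cs := by
  have := splitOn_go_eq cs (cs.length + 1) [] [] (by omega)
  simpa [PySem.Chars.splitOn, modifyHead_idfun] using this

-- B side: RLE via pvSplit equals the carried-count RLE, generalised over an open run of k ones
theorem pvSplit_rwc (cs : List Char) (h : ∀ c ∈ cs, c = '0' ∨ c = '1') : ∀ (k : Nat),
    (((pvSplit cs).modifyHead (List.replicate k '1' ++ ·)).filter (fun g => g ≠ [])).map
        (fun g => (g.length : Int))
      = pvRwc (k : Int) (cs.map (fun c => c ≠ '0')) := by
  induction cs with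
  | nil =>
    intro k
    cases k with
    | zero => simp [pvSplit, pvRwc]
    | succ k =>
      have hk : ¬((k : Int) + 1 = 0) := by omega
      simp [pvSplit, pvRwc, List.replicate_succ]
      omega
  | cons c rest ih =>
    intro k
    have hrest : ∀ c ∈ rest, c = '0' ∨ c = '1' := fun x hx => h x (List.mem_cons_of_mem _ hx)
    by_cases hc : c = '0'
    · subst hc
      have h0 := ih hrest 0
      simp only [List.replicate, List.nil_append, modifyHead_idfun, Nat.cast_zero] at h0
      cases k with
      | zero =>
        simp only [pvSplit, List.modifyHead, List.replicate, List.nil_append, Nat.cast_zero,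
          List.map_cons, pvRwc]
        simp only [decide_not]
        simpa using h0
      | succ k =>
        have hk : ¬((k : Int) + 1 = 0) := by omega
        simp only [pvSplit, List.modifyHead, List.map_cons, pvRwc]
        simp [hk, List.replicate_succ]
        simpa using h0
    · have hc1 : c = '1' := (h c (List.mem_cons_self)).resolve_left hc
      subst hc1
      have hstep := ih hrest (k + 1)
      simp only [pvSplit, if_neg hc, List.map_cons]
      have hmod : ((pvSplit rest).modifyHead ((· :: ·) '1')).modifyHead (List.replicate k '1' ++ ·)
          = (pvSplit rest).modifyHead (List.replicate (k + 1) '1' ++ ·) := by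
        rcases hne : pvSplit rest with _ | ⟨g, gs⟩
        · exact absurd hne (pvSplit_ne_nil rest)
        · simp [List.modifyHead, List.replicate_succ']
      rw [hmod, hstep, show ((k + 1 : Nat) : Int) = (k : Int) + 1 by push_cast; ring]
      simp [pvRwc]

-- A side: the counter/mask fold, finalised, equals the carried-count RLE of the bit list
theorem foldA_rwc (damaged : Int) : ∀ (n k : Nat) (cc : Int) (cnt : List Int),
    (let st := (List.range n).foldl
        (fun (st : Int × List Int × Int) (_ : Nat) =>
          let cc := st.1; let cnt := st.2.1; let mask := st.2.2
          if PySem.Int.band damaged mask ≠ 0 then (cc + 1, cnt, mask <<< (1 : Nat))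
          else if cc ≠ 0 then (0, cnt ++ [cc], mask <<< (1 : Nat))
          else (cc, cnt, mask <<< (1 : Nat)))
        (cc, cnt, (1 : Int) <<< k)
     if st.1 ≠ 0 then st.2.1 ++ [st.1] else st.2.1)
      = cnt ++ pvRwc cc ((List.range n).map
          (fun j => PySem.Int.band damaged ((1 : Int) <<< (k + j)) ≠ 0)) := by
  intro n
  induction n with
  | zero =>
    intro k cc cnt
    simp only [List.range_zero, List.foldl_nil, List.map_nil, pvRwc]
    split_ifs <;> simp
  | succ n ih =>
    intro k cc cnt
    rw [List.range_succ_eq_map, List.foldl_cons, List.foldl_map]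
    simp only [List.map_cons, List.map_map, Nat.add_zero, Function.comp_def]
    have hshift : ((1 : Int) <<< k) <<< (1 : Nat) = (1 : Int) <<< (k + 1) :=
      (Int.shiftLeft_add 1 k 1).symm
    have harith : ((List.range n).map (fun j => decide
          (PySem.Int.band damaged ((1 : Int) <<< (k + Nat.succ j)) ≠ 0)))
        = ((List.range n).map (fun j => decide
          (PySem.Int.band damaged ((1 : Int) <<< (k + 1 + j)) ≠ 0))) := by
      apply List.map_congr_left
      intro j _
      have : k + Nat.succ j = k + 1 + j := by omega
      rw [this]
    by_cases hbit : PySem.Int.band damaged ((1 : Int) <<< k) ≠ 0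
    · simp only [hbit, hshift, pvRwc, ne_eq, not_false_iff, decide_true, if_true, harith]
      exact ih (k + 1) (cc + 1) cnt
    · have hbit' : PySem.Int.band damaged ((1 : Int) <<< k) = 0 := not_not.mp hbit
      by_cases hcc : cc ≠ 0
      · simp only [hbit', hshift, pvRwc, ne_eq, not_true_eq_false, decide_false, if_false,
          Bool.false_eq_true, harith, hcc, not_false_iff, if_true]
        rw [ih (k + 1) 0 (cnt ++ [cc])]
        simp [List.append_assoc]
      · have hcc' : cc = 0 := not_not.mp hcc
        simp only [hbit', hcc', hshift, pvRwc, ne_eq, not_true_eq_false, decide_false, if_false,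
          Bool.false_eq_true, harith]
        have := ih (k + 1) (0 : Int) cnt
        simpa using this

-- ===== VERDICT (by name: the statement is the Claim_ definition above) =====
theorem check_validity_bitwise_spec : Claim_equal_check_validity_bitwise := by
  intro damaged valid length _
  unfold Spec_check_validity_bitwise
  have hrange : PySem.List.pyRange 0 length 1
      = List.map (fun k : Nat => (k : Int)) (List.range length.toNat) := by
    by_cases hl : 0 ≤ length
    · obtain ⟨n, rfl⟩ := Int.eq_ofNat_of_zero_le hl
      simpa using PySem.List.pyRange_zero_natCast n
    · have h1 : PySem.List.pyRange 0 length 1 = [] := by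
        simp [PySem.List.pyRange]; omega
      have h2 : length.toNat = 0 := by omega
      simp [h1, h2]
  have hA : check_validity_bitwise damaged valid length
      = (pvRwc 0 ((List.range length.toNat).map
          (fun j : Nat => decide (PySem.Int.band damaged ((1 : Int) <<< j) ≠ 0))) == valid) := by
    unfold check_validity_bitwise
    rw [hrange, List.foldl_map]
    have h := foldA_rwc damaged length.toNat 0 0 []
    simp only [List.nil_append, Nat.zero_add] at h
    refine congrArg (fun l : List Int => l == valid) ?_
    exact h
  have hB : check_validity_bitwise_alt damaged valid length
      = (pvRwc 0 ((List.range length.toNat).map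
          (fun j : Nat => decide (PySem.Int.band damaged ((1 : Int) <<< j) ≠ 0))) == valid) := by
    unfold check_validity_bitwise_alt
    simp only [hrange, List.map_map, splitOn_eq_pvSplit]
    have hchars : ∀ c ∈ (List.range length.toNat).map
        ((fun i : Int => if PySem.Int.band damaged ((1 : Int) <<< (i.toNat : Nat)) ≠ 0 then '1' else '0')
          ∘ (fun k : Nat => (k : Int))), c = '0' ∨ c = '1' := by
      intro c hc
      simp only [List.mem_map, Function.comp] at hc
      obtain ⟨j, _, rfl⟩ := hc
      split_ifs <;> simp
    have h := pvSplit_rwc _ hchars 0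
    simp only [List.replicate, List.nil_append, modifyHead_idfun, Nat.cast_zero] at h
    have hmaps : (((List.range length.toNat).map
        ((fun i : Int => if PySem.Int.band damaged ((1 : Int) <<< (i.toNat : Nat)) ≠ 0 then '1' else '0')
          ∘ (fun k : Nat => (k : Int)))).map (fun c => decide (c ≠ '0')))
        = (List.range length.toNat).map
          (fun j : Nat => decide (PySem.Int.band damaged ((1 : Int) <<< j) ≠ 0)) := by
      rw [List.map_map]
      apply List.map_congr_left
      intro j _
      simp only [Function.comp, Int.toNat_natCast]
      split_ifs with h1 <;> simp [h1]
    rw [hmaps] at h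
    refine congrArg (fun l : List Int => l == valid) ?_
    exact h
  rw [hA, hB]
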